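-- pv_equiv track=rewrite | github.com/nishamalviya/Text-Extraction | main.py | _parse_langs
-- ===== SOURCE A (Python) =====
-- from typing import Dict, List, Optional, Tuple
--
-- def _parse_langs(lang: str) -> List[str]:
--     if not lang:
--         return ["en"]
--     lang = lang.strip().lower()
--     if lang in {"auto", "multi"}:
--         return ["en", "hi", "ta", "te"]
--     if "," in lang:
--         langs = []
--         for part in lang.split(","):
--             p = part.strip().lower()
--             if p in {"tel", "te"}:
--                 p = "te"
--             if p:
--                 langs.append(p)
--         return langs or ["en"]
--     if lang in {"tel", "te"}:
--         lang = "te"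
--     return [lang]
-- ===== SOURCE B (Python) =====
-- def _parse_langs(lang):
--     if not lang:
--         return ["en"]
--     s = lang.strip().lower()
--     if s in {"auto", "multi"}:
--         return ["en", "hi", "ta", "te"]
--     langs = []
--     buf = []
--     for ch in s + ",":
--         if ch == ",":
--             tok = "".join(buf).strip()
--             if tok == "tel":
--                 tok = "te"
--             if tok:
--                 langs.append(tok)
--             buf = []
--         else:
--             buf.append(ch)
--     return langs or ["en"]
-- ===== Notes on version B (the rewrite author's own statement) =====
-- stated objective: alternative
-- what changed: A splits on commas (with a separate no-comma tail branch) and post-processes each part; B is a single character-level pass: a hand-written tokenizer that scans the normalized string once with a buffer, flushing a stripped/remapped token at each comma, so split() and the no-comma branch disappear.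
-- intended difference: On nonempty whitespace-only input A falls through its no-comma tail and returns a list holding one empty string (an empty language code); B's tokenizer emits no token there and returns ['en'], the intended default. — e.g. on _parse_langs(" "): A returns [""], B returns ["en"]
import Mathlib
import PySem

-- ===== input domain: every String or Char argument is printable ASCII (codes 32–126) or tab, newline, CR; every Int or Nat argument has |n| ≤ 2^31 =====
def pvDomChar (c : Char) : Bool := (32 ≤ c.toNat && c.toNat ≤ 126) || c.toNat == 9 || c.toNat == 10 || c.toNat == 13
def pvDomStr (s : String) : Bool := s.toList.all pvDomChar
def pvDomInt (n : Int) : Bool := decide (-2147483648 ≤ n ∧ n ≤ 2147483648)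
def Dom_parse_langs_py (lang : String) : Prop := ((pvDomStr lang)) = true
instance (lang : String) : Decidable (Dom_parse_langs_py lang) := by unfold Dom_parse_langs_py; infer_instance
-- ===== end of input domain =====

-- B replaces A's comma split (and its separate no-comma tail branch) by a single
-- character-level tokenizer pass with a buffer; on nonempty whitespace-only input A
-- returns [""] while B returns ["en"] (see D_ below).

-- ===== PORT A =====
def parse_langs_py (lang : String) : List String :=
  if lang.toList = [] then ["en"]
  else
    let l := PySem.Chars.lower (PySem.Chars.strip lang.toList)
    if l = ['a','u','t','o'] ∨ l = ['m','u','l','t','i'] then ["en", "hi", "ta", "te"]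
    else if PySem.Chars.isIn [','] l then
      let langs := (PySem.Chars.splitOn l [',']).foldl (fun acc part =>
        let p := PySem.Chars.lower (PySem.Chars.strip part)
        let p := if p = ['t','e','l'] ∨ p = ['t','e'] then ['t','e'] else p
        if p ≠ [] then acc ++ [p] else acc) []
      if langs = [] then ["en"] else langs.map String.ofList
    else
      let l := if l = ['t','e','l'] ∨ l = ['t','e'] then ['t','e'] else l
      [String.ofList l]

-- ===== PORT B =====
-- one step of Source B's tokenizer loop: state = (langs, buf); on ',' flush the stripped,
-- remapped, nonempty token, otherwise extend the buffer
def pvTokStep (st : List (List Char) × List Char) (ch : Char) : List (List Char) × List Char :=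
  if ch = ',' then
    let tok := PySem.Chars.strip st.2
    let tok := if tok = ['t','e','l'] then ['t','e'] else tok
    (if tok ≠ [] then st.1 ++ [tok] else st.1, [])
  else (st.1, st.2 ++ [ch])

def parse_langs_py_alt (lang : String) : List String :=
  if lang.toList = [] then ["en"]
  else
    let s := PySem.Chars.lower (PySem.Chars.strip lang.toList)
    if s = ['a','u','t','o'] ∨ s = ['m','u','l','t','i'] then ["en", "hi", "ta", "te"]
    else
      let st := (s ++ [',']).foldl pvTokStep ([], [])
      if st.1 = [] then ["en"] else st.1.map String.ofList

-- ===== PRECONDITION & SPEC =====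
-- On nonempty whitespace-only input A falls through its no-comma tail and returns [""] (an
-- empty language code, an artefact of stripping); B's tokenizer emits no token there and
-- returns ["en"], the intended default.
def D_parse_langs_py (lang : String) : Prop := PySem.Str.strIsspace lang = true
instance (lang : String) : Decidable (D_parse_langs_py lang) := by unfold D_parse_langs_py; infer_instance
def Spec_parse_langs_py (lang : String) (out : List String) : Prop :=
  ¬ D_parse_langs_py lang → out = parse_langs_py_alt lang
instance (lang : String) (out : List String) : Decidable (Spec_parse_langs_py lang out) := by unfold Spec_parse_langs_py; infer_instance
def pvDiffWitness_parse_langs_py : String := " "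
def pvDiffWitnessOut_parse_langs_py : (List String) × (List String) := ([""], ["en"])

-- ===== CLAIM (what is proved, stated in full; the proofs are below) =====
def Claim_unchanged_parse_langs_py : Prop := ∀ (lang : String), Dom_parse_langs_py lang → Spec_parse_langs_py lang (parse_langs_py lang)
def Claim_changed_parse_langs_py : Prop := Dom_parse_langs_py (pvDiffWitness_parse_langs_py) ∧ D_parse_langs_py (pvDiffWitness_parse_langs_py) ∧ parse_langs_py (pvDiffWitness_parse_langs_py) = pvDiffWitnessOut_parse_langs_py.1 ∧ parse_langs_py_alt (pvDiffWitness_parse_langs_py) = pvDiffWitnessOut_parse_langs_py.2 ∧ pvDiffWitnessOut_parse_langs_py.1 ≠ pvDiffWitnessOut_parse_langs_py.2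
def Claim_exact_parse_langs_py : Prop := ∀ (lang : String), Dom_parse_langs_py lang → D_parse_langs_py lang → parse_langs_py lang ≠ parse_langs_py_alt lang

-- ===== LEMMAS AND PROOFS =====

-- proof-side vocabulary: A's per-part normalizer and remap, B's remap, a functional
-- specification of comma splitting, and B's flush pipeline
def pvPart (part : List Char) : List Char := PySem.Chars.lower (PySem.Chars.strip part)
def pvRemap (p : List Char) : List Char :=
  if p = ['t','e','l'] ∨ p = ['t','e'] then ['t','e'] else p
def pvRemapB (p : List Char) : List Char := if p = ['t','e','l'] then ['t','e'] else p
def pvMapHead (f : List Char → List Char) : List (List Char) → List (List Char)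
  | [] => []
  | x :: xs => f x :: xs
def pvSplitComma : List Char → List (List Char)
  | [] => [[]]
  | c :: r => if c = ',' then [] :: pvSplitComma r else pvMapHead (fun t => c :: t) (pvSplitComma r)
def pvPipeB (ps : List (List Char)) : List (List Char) :=
  (ps.map (fun p => pvRemapB (PySem.Chars.strip p))).filter (· ≠ [])

theorem pvRemap_eq_remapB (p : List Char) : pvRemap p = pvRemapB p := by
  unfold pvRemap pvRemapB
  by_cases h : p = ['t','e','l'] <;> by_cases h2 : p = ['t','e'] <;> simp [h, h2]

theorem pvRemapB_eq_nil_iff (p : List Char) : pvRemapB p = [] ↔ p = [] := by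
  unfold pvRemapB; split
  · rename_i h; subst h; simp
  · exact Iff.rfl

theorem pvSplitComma_ne_nil (l : List Char) : pvSplitComma l ≠ [] := by
  cases l with
  | nil => simp [pvSplitComma]
  | cons c r =>
    unfold pvSplitComma
    split
    · simp
    · cases h : pvSplitComma r with
      | nil => exact absurd h (pvSplitComma_ne_nil r)
      | cons x xs => simp [pvMapHead]

theorem pvMapHead_mapHead (f g : List Char → List Char) (l : List (List Char)) :
    pvMapHead f (pvMapHead g l) = pvMapHead (fun t => f (g t)) l := by
  cases l <;> simp [pvMapHead]

theorem pvMapHead_id (l : List (List Char)) : pvMapHead (fun t => t) l = l := by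
  cases l <;> simp [pvMapHead]

-- splitOn.go with sep [','] computes the functional comma split
theorem go_eq_splitComma :
    ∀ (fuel : Nat) (l cur : List Char) (acc : List (List Char)), l.length < fuel →
      PySem.Chars.splitOn.go [','] fuel l cur acc
        = acc.reverse ++ pvMapHead (fun t => cur.reverse ++ t) (pvSplitComma l) := by
  intro fuel
  induction fuel with
  | zero => intro l cur acc h; omega
  | succ n ih =>
    intro l cur acc h
    cases l with
    | nil => simp [PySem.Chars.splitOn.go, pvSplitComma, pvMapHead]
    | cons c rest =>
      unfold PySem.Chars.splitOn.go
      by_cases hc : c = ','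
      · subst hc
        have hpre : List.isPrefixOf [','] (',' :: rest) = true := by
          simp [List.isPrefixOf]
        rw [if_pos hpre]
        simp only [List.length_cons, List.length_nil, List.drop_succ_cons, List.drop_zero]
        rw [ih rest [] (cur.reverse :: acc) (by simpa using Nat.lt_of_succ_lt_succ h)]
        simp only [pvSplitComma, List.reverse_cons, List.reverse_nil,
          List.nil_append, List.append_assoc]
        cases hs : pvSplitComma rest with
        | nil => exact absurd hs (pvSplitComma_ne_nil rest)
        | cons x xs => simp [pvMapHead]
      · have hpre : List.isPrefixOf [','] (c :: rest) = false := by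
          have : (',' == c) = false := by simpa using fun h2 => hc h2.symm
          simp [List.isPrefixOf, this]
        rw [if_neg (by simp [hpre])]
        rw [ih rest (c :: cur) acc (by simpa using Nat.lt_of_succ_lt_succ h)]
        simp only [pvSplitComma, if_neg hc]
        cases hs : pvSplitComma rest with
        | nil => exact absurd hs (pvSplitComma_ne_nil rest)
        | cons x xs => simp [pvMapHead]

theorem splitOn_eq_splitComma (l : List Char) :
    PySem.Chars.splitOn l [','] = pvSplitComma l := by
  unfold PySem.Chars.splitOn
  rw [go_eq_splitComma (l.length + 1) l [] [] (by omega)]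
  simp [pvMapHead_id]

theorem pvPipeB_cons (p : List Char) (ps : List (List Char)) :
    pvPipeB (p :: ps) = pvPipeB [p] ++ pvPipeB ps := by
  by_cases h : pvRemapB (PySem.Chars.strip p) = [] <;>
    simp [pvPipeB, h]

-- B's tokenizer loop over s + "," computes the flush pipeline over the comma split
theorem tok_loop :
    ∀ (l buf : List Char) (langs : List (List Char)),
      (l ++ [',']).foldl pvTokStep (langs, buf)
        = (langs ++ pvPipeB (pvMapHead (fun t => buf ++ t) (pvSplitComma l)), []) := by
  intro l
  induction l with
  | nil =>
    intro buf langs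
    simp only [List.nil_append, List.foldl_cons, List.foldl_nil, pvTokStep,
      pvSplitComma, pvMapHead, List.append_nil, pvPipeB, List.map_cons, List.map_nil,
      List.filter, pvRemapB]
    by_cases h : (if PySem.Chars.strip buf = ['t','e','l'] then ['t','e'] else PySem.Chars.strip buf) = [] <;>
      simp [h]
  | cons c rest ih =>
    intro buf langs
    by_cases hc : c = ','
    · subst hc
      simp only [List.cons_append, List.foldl_cons]
      have hstep : pvTokStep (langs, buf) ',' = (langs ++ pvPipeB [buf], []) := by
        simp only [pvTokStep, if_pos rfl, pvPipeB, List.map_cons, List.map_nil,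
          List.filter, pvRemapB]
        by_cases h : (if PySem.Chars.strip buf = ['t','e','l'] then ['t','e'] else PySem.Chars.strip buf) = [] <;>
          simp [h]
      rw [hstep, ih [] (langs ++ pvPipeB [buf])]
      simp only [pvSplitComma, if_pos rfl]
      cases hs : pvSplitComma rest with
      | nil => exact absurd hs (pvSplitComma_ne_nil rest)
      | cons x xs => simp [pvMapHead, pvPipeB_cons buf (x :: xs)]

    · simp only [List.cons_append, List.foldl_cons]
      have hstep : pvTokStep (langs, buf) c = (langs, buf ++ [c]) := by
        simp [pvTokStep, hc]
      rw [hstep, ih (buf ++ [c]) langs]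
      simp only [pvSplitComma, if_neg hc, pvMapHead_mapHead]
      cases hs : pvSplitComma rest with
      | nil => exact absurd hs (pvSplitComma_ne_nil rest)
      | cons x xs => simp [pvMapHead]

-- A's append-if loop over the parts IS a map-remap over the filtered stripped parts
theorem loop_eq_pipeline (ps : List (List Char)) (acc : List (List Char)) :
    ps.foldl (fun acc part =>
        let p := PySem.Chars.lower (PySem.Chars.strip part)
        let p := if p = ['t','e','l'] ∨ p = ['t','e'] then ['t','e'] else p
        if p ≠ [] then acc ++ [p] else acc) acc
      = acc ++ ((ps.map pvPart).filter (· ≠ [])).map pvRemap := by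
  induction ps generalizing acc with
  | nil => simp
  | cons part rest ih =>
    rw [List.foldl_cons, ih]
    have hstep :
        (let p := PySem.Chars.lower (PySem.Chars.strip part)
         let p := if p = ['t','e','l'] ∨ p = ['t','e'] then ['t','e'] else p
         if p ≠ [] then acc ++ [p] else acc)
        = if pvRemap (pvPart part) ≠ [] then acc ++ [pvRemap (pvPart part)] else acc := by
      simp only [pvPart, pvRemap]
    rw [hstep]
    simp only [List.map_cons, List.filter_cons]
    by_cases hp : pvPart part = []
    · have h2 : pvRemap (pvPart part) = [] := by
        rw [pvRemap_eq_remapB, pvRemapB_eq_nil_iff]; exact hp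
      simp [hp, h2]
      simp [pvRemap]

    · have h2 : pvRemap (pvPart part) ≠ [] := by
        rw [pvRemap_eq_remapB, Ne, pvRemapB_eq_nil_iff]; exact hp
      simp [hp, h2]

-- every char of a comma-split part occurs in the split string
theorem mem_splitComma_mem (l part : List Char) (hp : part ∈ pvSplitComma l) :
    ∀ c ∈ part, c ∈ l := by
  induction l generalizing part with
  | nil => simp [pvSplitComma] at hp; subst hp; simp
  | cons a r ih =>
    unfold pvSplitComma at hp
    by_cases ha : a = ','
    · rw [if_pos ha] at hp
      rcases List.mem_cons.mp hp with h | h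
      · subst h; simp
      · intro c hc; exact List.mem_cons_of_mem _ (ih part h c hc)
    · rw [if_neg ha] at hp
      cases hs : pvSplitComma r with
      | nil => exact absurd hs (pvSplitComma_ne_nil r)
      | cons x xs =>
        rw [hs] at hp
        simp only [pvMapHead] at hp
        rcases List.mem_cons.mp hp with h | h
        · subst h
          intro c hc
          rcases List.mem_cons.mp hc with h2 | h2
          · subst h2; simp
          · exact List.mem_cons_of_mem _ (ih x (by simp [hs]) c h2)
        · intro c hc
          exact List.mem_cons_of_mem _ (ih part (by simp [hs, h]) c hc)

-- chars surviving strip occur in the original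
theorem mem_of_mem_strip (xs : List Char) (c : Char) (h : c ∈ PySem.Chars.strip xs) : c ∈ xs := by
  unfold PySem.Chars.strip PySem.Chars.lstrip PySem.Chars.rstrip at h
  rw [List.mem_reverse] at h
  have h1 := (List.dropWhile_sublist (p := PySem.Chars.isspace)).subset h
  rw [List.mem_reverse] at h1
  exact (List.dropWhile_sublist (p := PySem.Chars.isspace)).subset h1

theorem isupper_iff (c : Char) : PySem.Chars.isupper c = true ↔ (65 ≤ c.toNat ∧ c.toNat ≤ 90) := by
  simp only [PySem.Chars.isupper, Bool.and_eq_true, decide_eq_true_eq, Char.le_def,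
    UInt32.le_iff_toNat_le, Char.toNat]
  have hA : ('A').val.toNat = 65 := rfl
  have hZ : ('Z').val.toNat = 90 := rfl
  rw [hA, hZ]

theorem toNat_shift (c : Char) (h : 65 ≤ c.toNat ∧ c.toNat ≤ 90) :
    (Char.ofNat (c.toNat + 32)).toNat = c.toNat + 32 := by
  rw [Char.toNat_ofNat, if_pos]
  left; omega

theorem lowerChar_lowerChar (c : Char) :
    PySem.Chars.lowerChar (PySem.Chars.lowerChar c) = PySem.Chars.lowerChar c := by
  unfold PySem.Chars.lowerChar
  split
  · rename_i h
    have hc := (isupper_iff c).mp h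
    have ht := toNat_shift c hc
    have : PySem.Chars.isupper (Char.ofNat (c.toNat + 32)) = false := by
      rw [Bool.eq_false_iff, Ne, isupper_iff, ht]
      omega
    simp [this]
  · rename_i h
    simp [h]

-- every char of a lowered string is fixed by lowerChar
theorem lower_fixed (t : List Char) (c : Char) (hc : c ∈ PySem.Chars.lower t) :
    PySem.Chars.lowerChar c = c := by
  unfold PySem.Chars.lower at hc
  obtain ⟨a, _, ha⟩ := List.mem_map.mp hc
  rw [← ha]
  exact lowerChar_lowerChar a

-- on a part of the comma split of a lowered string, A's strip-then-lower is just strip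
theorem pvPart_eq_strip (t part : List Char) (hp : part ∈ pvSplitComma (PySem.Chars.lower t)) :
    pvPart part = PySem.Chars.strip part := by
  unfold pvPart PySem.Chars.lower
  rw [List.map_congr_left, List.map_id]
  intro c hc
  exact lower_fixed t c (mem_splitComma_mem _ part hp c (mem_of_mem_strip part c hc))

-- A's pipeline over the comma split of a lowered string is B's flush pipeline
theorem pipelineA_eq_pipeB (t : List Char) :
    (((pvSplitComma (PySem.Chars.lower t)).map pvPart).filter (· ≠ [])).map pvRemap
      = pvPipeB (pvSplitComma (PySem.Chars.lower t)) := by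
  unfold pvPipeB
  rw [List.map_congr_left (fun p hp => pvPart_eq_strip t p hp)]
  have hf : ((fun x => decide (x ≠ [])) ∘ fun p => pvRemapB (PySem.Chars.strip p))
      = ((fun x => decide (x ≠ [])) ∘ PySem.Chars.strip) := by
    funext p
    simp only [Function.comp_apply, ne_eq, decide_not, Bool.not_inj_iff, decide_eq_decide]
    rw [pvRemapB_eq_nil_iff]
  rw [List.filter_map, List.filter_map, List.map_map, hf]
  congr 1
  funext p
  exact pvRemap_eq_remapB (PySem.Chars.strip p)

-- a comma-free string does not split
theorem splitComma_no_comma (l : List Char) (h : ',' ∉ l) : pvSplitComma l = [l] := by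
  induction l with
  | nil => rfl
  | cons c r ih =>
    have hc : c ≠ ',' := fun h2 => h (h2 ▸ List.mem_cons_self)
    have hr : ',' ∉ r := fun h2 => h (List.mem_cons_of_mem _ h2)
    simp only [pvSplitComma, if_neg hc, ih hr, pvMapHead]

-- isspace is invariant under lowerChar
theorem isspace_lowerChar (c : Char) :
    PySem.Chars.isspace (PySem.Chars.lowerChar c) = PySem.Chars.isspace c := by
  unfold PySem.Chars.lowerChar
  split
  · rename_i h
    have hc := (isupper_iff c).mp h
    have ht := toNat_shift c hc
    unfold PySem.Chars.isspace
    simp only [ht]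
    have h1 := hc.1; have h2 := hc.2
    apply Bool.eq_iff_iff.mpr
    simp only [Bool.or_eq_true, Bool.and_eq_true, decide_eq_true_eq]
    omega
  · rfl

-- strip commutes with lower
theorem strip_lower (s : List Char) :
    PySem.Chars.strip (PySem.Chars.lower s) = PySem.Chars.lower (PySem.Chars.strip s) := by
  unfold PySem.Chars.strip PySem.Chars.lstrip PySem.Chars.rstrip PySem.Chars.lower
  rw [List.dropWhile_map, ← List.map_reverse, List.dropWhile_map, List.map_reverse]
  have : (PySem.Chars.isspace ∘ PySem.Chars.lowerChar) = PySem.Chars.isspace := by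
    funext c; simp [Function.comp, isspace_lowerChar]
  rw [this]

-- dropWhile is idempotent
theorem dropWhile_idem {α : Type} (p : α → Bool) (l : List α) :
    List.dropWhile p (List.dropWhile p l) = List.dropWhile p l := by
  rw [List.dropWhile_eq_self_iff]
  intro h
  have := List.head_dropWhile_not p (l := l) (by simpa [List.length_pos_iff] using h)
  simpa [List.head_eq_getElem] using this

-- head of lstrip is not a space
theorem head_lstrip_not_space (s : List Char) (h : PySem.Chars.lstrip s ≠ []) :
    PySem.Chars.isspace ((PySem.Chars.lstrip s).head h) = false := by
  unfold PySem.Chars.lstrip at *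
  simpa using List.head_dropWhile_not PySem.Chars.isspace h

-- rstrip is a prefix of its argument
theorem rstrip_prefix (s : List Char) : PySem.Chars.rstrip s <+: s := by
  unfold PySem.Chars.rstrip
  conv_rhs => rw [← List.reverse_reverse s]
  exact (List.dropWhile_suffix _).reverse

-- the first element surviving dropWhile fails the predicate
theorem dropWhile_cons_head {α : Type} (p : α → Bool) (l : List α) (c : α) (r : List α)
    (h : List.dropWhile p l = c :: r) : p c = false := by
  induction l with
  | nil => simp at h
  | cons a as ih =>
    rw [List.dropWhile_cons] at h
    by_cases hpa : p a = true
    · rw [if_pos hpa] at h; exact ih h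
    · rw [if_neg hpa] at h; injection h with h1 _; subst h1; simpa using hpa

-- strip is idempotent
theorem strip_strip (s : List Char) :
    PySem.Chars.strip (PySem.Chars.strip s) = PySem.Chars.strip s := by
  unfold PySem.Chars.strip
  have hl : PySem.Chars.lstrip (PySem.Chars.rstrip (PySem.Chars.lstrip s))
      = PySem.Chars.rstrip (PySem.Chars.lstrip s) := by
    cases hr : PySem.Chars.rstrip (PySem.Chars.lstrip s) with
    | nil => simp [PySem.Chars.lstrip]
    | cons c cs =>
      have hpre : PySem.Chars.rstrip (PySem.Chars.lstrip s) <+: PySem.Chars.lstrip s :=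
        rstrip_prefix _
      rw [hr] at hpre
      obtain ⟨u, hu⟩ := hpre
      have hcs : PySem.Chars.isspace c = false := by
        apply dropWhile_cons_head PySem.Chars.isspace s c (cs ++ u)
        have hls : PySem.Chars.lstrip s = c :: (cs ++ u) := by rw [← hu]; simp
        simpa [PySem.Chars.lstrip] using hls
      simp [PySem.Chars.lstrip, hcs]
  rw [hl]
  unfold PySem.Chars.rstrip
  rw [List.reverse_reverse, dropWhile_idem]

-- a nonempty not-all-whitespace string strips to something nonempty
theorem strip_ne_nil (s : List Char) (hsp : ¬ (s.all PySem.Chars.isspace = true)) :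
    PySem.Chars.strip s ≠ [] := by
  have ⟨c, hc, hcs⟩ : ∃ c ∈ s, ¬ PySem.Chars.isspace c = true := by
    simpa [List.all_eq_true] using hsp
  have hls : PySem.Chars.lstrip s ≠ [] := by
    unfold PySem.Chars.lstrip
    rw [Ne, List.dropWhile_eq_nil_iff]
    push_neg
    exact ⟨c, hc, hcs⟩
  have hhead := head_lstrip_not_space s hls
  unfold PySem.Chars.strip PySem.Chars.rstrip
  rw [Ne, List.reverse_eq_nil_iff, List.dropWhile_eq_nil_iff]
  push_neg
  exact ⟨(PySem.Chars.lstrip s).head hls, by simp [List.head_mem], by simp [hhead]⟩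

-- an all-whitespace string strips to []
theorem strip_all_space (s : List Char) (hsp : s.all PySem.Chars.isspace = true) :
    PySem.Chars.strip s = [] := by
  have h1 : PySem.Chars.lstrip s = [] := by
    unfold PySem.Chars.lstrip
    rw [List.dropWhile_eq_nil_iff]
    exact fun x hx => (List.all_eq_true.mp hsp) x hx
  unfold PySem.Chars.strip
  rw [h1]
  simp [PySem.Chars.rstrip]

-- mapHead with a nil prefix is the identity
theorem pvMapHead_nil_append (xs : List (List Char)) :
    pvMapHead (fun t => [] ++ t) xs = xs := by
  cases xs <;> simp [pvMapHead]

-- ===== VERDICT (by name: the statement is the Claim_ definition above) =====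
theorem parse_langs_py_spec : Claim_unchanged_parse_langs_py := by
  intro lang _ hD
  unfold parse_langs_py parse_langs_py_alt
  by_cases h0 : lang.toList = []
  · simp [h0]
  · simp only [h0, if_false]
    set s := PySem.Chars.lower (PySem.Chars.strip lang.toList) with hs
    by_cases ham : s = ['a','u','t','o'] ∨ s = ['m','u','l','t','i']
    · simp [ham]
    · simp only [ham, if_false]
      rw [tok_loop s [] [], pvMapHead_nil_append]
      simp only [List.nil_append]
      by_cases hc : PySem.Chars.isIn [','] s = true
      · simp only [hc, if_true]
        rw [loop_eq_pipeline]
        simp only [List.nil_append]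
        rw [splitOn_eq_splitComma, hs, pipelineA_eq_pipeB (PySem.Chars.strip lang.toList)]
      · have hc' : PySem.Chars.isIn [','] s = false := by simpa using hc
        simp only [hc', Bool.false_eq_true, if_false]
        have hnc : ',' ∉ s := by
          intro hm
          rw [PySem.Chars.isIn_eq_false_iff] at hc'
          obtain ⟨u, v, huv⟩ := List.append_of_mem hm
          exact hc' ⟨u, v, by simp [huv]⟩
        rw [splitComma_no_comma s hnc]
        have hse : PySem.Chars.strip s = s := by
          rw [hs, strip_lower, strip_strip]
        have hne : s ≠ [] := by
          have hsp : ¬ (lang.toList.all PySem.Chars.isspace = true) := by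
            intro hall
            exact hD (by
              unfold D_parse_langs_py PySem.Str.strIsspace PySem.Chars.strIsspace
              simp [h0, hall])
          rw [hs]
          simpa [PySem.Chars.lower] using strip_ne_nil lang.toList hsp
        have hrne : pvRemapB s ≠ [] := fun h => hne ((pvRemapB_eq_nil_iff _).mp h)
        simp only [pvPipeB, List.map_cons, List.map_nil, hse, List.filter]
        rw [← pvRemap_eq_remapB] at hrne ⊢
        simp only [pvRemap] at hrne ⊢
        simp [hrne]

theorem parse_langs_py_changed : Claim_changed_parse_langs_py := by
  unfold Claim_changed_parse_langs_py; decide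

theorem parse_langs_py_tight : Claim_exact_parse_langs_py := by
  intro lang _ hD
  unfold D_parse_langs_py PySem.Str.strIsspace PySem.Chars.strIsspace at hD
  have h0 : lang.toList ≠ [] := by
    intro h; rw [h] at hD; simp at hD
  have hall : lang.toList.all PySem.Chars.isspace = true := by
    cases h : lang.toList.all PySem.Chars.isspace
    · rw [h] at hD; simp at hD
    · rfl
  have hstrip : PySem.Chars.strip lang.toList = [] := strip_all_space lang.toList hall
  unfold parse_langs_py parse_langs_py_alt
  simp only [h0, if_false, hstrip]
  simp [PySem.Chars.lower, PySem.Chars.isIn, pvTokStep, PySem.Chars.strip,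
    PySem.Chars.lstrip, PySem.Chars.rstrip, PySem.Chars.find_eq_neg_one_iff]
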